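-- pv_equiv track=rewrite | github.com/liavf/Boggle | ex12_utils.py | _find_path_helper
-- ===== SOURCE A (Python) =====
-- import itertools
-- from typing import List, Dict, Set, Any, Tuple
--
-- Board = List[List[str]]
--
-- Location = Tuple[int, int]
--
-- def get_from_location(board: Board, location:Location) -> str:
--     """ gets the letter in given location """
--     return board[location[0]][location[1]]
--
-- def get_neighbors(location, board_length: int) -> List:
--     """ gets neighbors of given cell (all directions) """
--     neighbors = []
--     x, y = location
--     for dx, dy in itertools.product((0,1,-1),repeat=2):
--         if not (dx == dy == 0) and 0 <= x+dx <= board_length - 1 and \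
--                                               0 <= y+dy <= board_length - 1:
--                 neighbors.append((x+dx, y+dy))
--     return neighbors
--
-- def _find_path_helper(start, board, n, curr_path, curr_word, paths,
--                       words, find_by):
--     """ recursive helper function for both n length words and n length paths by key """
--     if find_by == "path":
--         key = curr_path
--     else:
--         key = curr_word
--
--     if len(key) == n:
--         if curr_word in words: # count only words from list
--             paths.append(curr_path[:])
--
--     elif len(key) < n:
--         for location in get_neighbors(start, len(board)):
--             if location not in curr_path:
--                 curr_path.append(location)
--                 curr_word += get_from_location(board, location)
--                 # words = start_word(curr_word, words)
--                 # if words: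
--                 _find_path_helper(location, board, n, curr_path, curr_word,
--                                       paths, words, find_by)
--                 curr_path.remove(location)
--                 curr_word = curr_word[:-1]
--     return paths
-- ===== SOURCE B (Python) =====
-- import itertools
--
-- def get_from_location(board, location):
--     """ gets the letter in given location """
--     return board[location[0]][location[1]]
--
-- def get_neighbors(location, board_length):
--     """ gets neighbors of given cell (all directions) """
--     neighbors = []
--     x, y = location
--     for dx, dy in itertools.product((0, 1, -1), repeat=2):
--         if not (dx == dy == 0) and 0 <= x + dx <= board_length - 1 and \
--                 0 <= y + dy <= board_length - 1:
--             neighbors.append((x + dx, y + dy))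
--     return neighbors
--
-- def _find_path_helper(start, board, n, curr_path, curr_word, paths,
--                       words, find_by):
--     """ iterative DFS: an explicit stack of frames replaces the recursion """
--     by_path = (find_by == "path")
--     word_set = set(words)
--     size = len(board)
--     path = curr_path          # shared and restored in place, like the recursion
--     frames = []               # frame = [neighbor list, next index, word here, entered by a push]
--
--     def open_frame(loc, word, pushed):
--         k = len(path) if by_path else len(word)
--         if k == n and word in word_set:
--             paths.append(path[:])
--         frames.append([get_neighbors(loc, size) if k < n else [], 0, word, pushed])
--
--     open_frame(start, curr_word, False)
--     while frames:
--         top = frames[-1]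
--         if top[1] < len(top[0]):
--             loc = top[0][top[1]]
--             top[1] += 1
--             if loc not in path:
--                 w = top[2] + get_from_location(board, loc)
--                 top[2] = w[:-1]           # the word the suspended loop resumes with
--                 path.append(loc)
--                 open_frame(loc, w, True)
--         else:
--             frames.pop()
--             if top[3]:
--                 path.pop()
--     return paths
-- ===== Notes on version B (the rewrite author's own statement) =====
-- stated objective: alternative
-- what changed: The recursive backtracking DFS is replaced by an iterative DFS driven by an explicit stack of frames (neighbor list, resume index, word to resume with, push flag); no Python recursion, the backtrack/restore happens when a frame is popped, and the word list is pre-hashed into a set for the membership test.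
import Mathlib
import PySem

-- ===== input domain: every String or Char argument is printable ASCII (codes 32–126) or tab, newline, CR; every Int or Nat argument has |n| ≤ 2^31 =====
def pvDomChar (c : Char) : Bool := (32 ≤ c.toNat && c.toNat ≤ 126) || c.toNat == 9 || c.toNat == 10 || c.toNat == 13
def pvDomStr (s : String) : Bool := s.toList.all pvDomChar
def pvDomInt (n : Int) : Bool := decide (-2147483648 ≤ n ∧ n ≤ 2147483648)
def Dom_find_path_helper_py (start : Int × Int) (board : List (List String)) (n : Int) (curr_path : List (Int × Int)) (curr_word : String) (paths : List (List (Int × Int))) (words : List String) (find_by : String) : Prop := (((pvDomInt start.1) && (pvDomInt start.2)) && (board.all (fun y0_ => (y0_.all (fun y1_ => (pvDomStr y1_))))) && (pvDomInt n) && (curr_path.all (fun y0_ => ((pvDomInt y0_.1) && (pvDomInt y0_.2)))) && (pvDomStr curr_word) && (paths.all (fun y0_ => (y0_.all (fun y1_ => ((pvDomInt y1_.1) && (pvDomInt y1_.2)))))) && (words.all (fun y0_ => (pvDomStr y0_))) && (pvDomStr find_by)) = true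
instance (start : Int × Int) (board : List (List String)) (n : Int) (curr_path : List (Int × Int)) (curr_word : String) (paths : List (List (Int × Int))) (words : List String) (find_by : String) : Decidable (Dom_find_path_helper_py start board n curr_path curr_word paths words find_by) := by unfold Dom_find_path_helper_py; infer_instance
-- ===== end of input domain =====

-- Port of _find_path_helper (recursive Boggle DFS) and of an iterative re-implementation that
-- drives the same DFS with an explicit stack of frames; proved to return the same list of paths.
-- (Both Pythons extend `paths` in place and restore `curr_path`; the equivalence is about the return value.)


-- ===== PORT A =====
-- shared helpers of the module (both Pythons call them verbatim)

-- key length: len(curr_path) if find_by == "path" else len(curr_word)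
def pvKeyLen (find_by : String) (path : List (Int × Int)) (word : String) : Int :=
  if find_by = "path" then (path.length : Int) else PySem.Str.len word

-- curr_word[:-1]
def pvStrInit (w : String) : String := PySem.Str.slice w none (some (-1))

-- get_from_location; total (Pre_ excludes the inputs where Python's board[x][y] raises)
def get_from_location_py (board : List (List String)) (loc : Int × Int) : String :=
  (PySem.List.pyGet? ((PySem.List.pyGet? board loc.1).getD []) loc.2).getD ""

-- get_neighbors, with itertools.product((0,1,-1), repeat=2) spelled out in CPython's order
def pvDeltas : List (Int × Int) :=
  [(0,0),(0,1),(0,-1),(1,0),(1,1),(1,-1),(-1,0),(-1,1),(-1,-1)]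

def get_neighbors_py (loc : Int × Int) (L : Int) : List (Int × Int) :=
  pvDeltas.foldl (fun acc d =>
    if ¬(d.1 = 0 ∧ d.2 = 0) ∧ 0 ≤ loc.1 + d.1 ∧ loc.1 + d.1 ≤ L - 1
        ∧ 0 ≤ loc.2 + d.2 ∧ loc.2 + d.2 ≤ L - 1 then
      acc ++ [(loc.1 + d.1, loc.2 + d.2)]
    else acc) []

-- termination machinery for the DFS: cells of the L×L grid not yet on the path
def pvGrid (L : Nat) : List (Int × Int) :=
  ((List.range L) ×ˢ (List.range L)).map (fun ij => ((ij.1 : Int), (ij.2 : Int)))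

def pvMu (L : Nat) (path : List (Int × Int)) : Nat :=
  ((pvGrid L).filter (fun c => decide (c ∉ path))).length

theorem pv_filter_length_lt {α : Type} (p q : α → Bool)
    (hq : ∀ x, q x = true → p x = true) :
    ∀ (l : List α) (a : α), a ∈ l → p a = true → q a = false →
      (l.filter q).length < (l.filter p).length := by
  intro l
  induction l with
  | nil => intro a ha; cases ha
  | cons x t ih =>
    intro a ha hpa hqa
    rcases List.mem_cons.mp ha with rfl | ha
    · rw [List.filter_cons, List.filter_cons, if_pos hpa, if_neg (by simp [hqa])]
      have hle : (t.filter q).length ≤ (t.filter p).length := by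
        have hsub : t.filter q = (t.filter p).filter q := by
          rw [List.filter_filter]
          apply List.filter_congr
          intro y _
          cases hqy : q y
          · simp
          · simp [hq y hqy]
        rw [hsub]
        exact List.length_filter_le _ _
      simp only [List.length_cons]
      omega
    · have hlt := ih a ha hpa hqa
      simp only [List.filter_cons]
      cases hpx : p x <;> cases hqx : q x
      · simpa using hlt
      · exact absurd (hq x hqx) (by simp [hpx])
      · simpa using Nat.lt_succ_of_lt hlt
      · simpa using Nat.succ_lt_succ hlt

theorem pvMu_concat_lt {L : Nat} {path : List (Int × Int)} {loc : Int × Int}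
    (hg : loc ∈ pvGrid L) (hp : loc ∉ path) :
    pvMu L (path ++ [loc]) < pvMu L path := by
  unfold pvMu
  apply pv_filter_length_lt (fun c => decide (c ∉ path)) (fun c => decide (c ∉ path ++ [loc]))
  · intro x hx
    simp only [decide_eq_true_eq] at hx ⊢
    intro hmem; exact hx (List.mem_append_left _ hmem)
  · exact hg
  · simpa using hp
  · simp

theorem pvGrid_mem {L : Nat} {a b : Int} (ha0 : 0 ≤ a) (haL : a < (L : Int))
    (hb0 : 0 ≤ b) (hbL : b < (L : Int)) : (a, b) ∈ pvGrid L := by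
  unfold pvGrid
  rw [List.mem_map]
  refine ⟨(a.toNat, b.toNat), ?_, ?_⟩
  · rw [List.mem_product]
    constructor <;> (rw [List.mem_range]; omega)
  · rw [Prod.mk.injEq]
    constructor <;> (simp; omega)

theorem pvNeighbors_mem_grid (loc : Int × Int) (L : Nat) :
    ∀ l ∈ get_neighbors_py loc (L : Int), l ∈ pvGrid L := by
  unfold get_neighbors_py
  suffices h : ∀ (ds : List (Int × Int)) (acc : List (Int × Int)),
      (∀ l ∈ acc, l ∈ pvGrid L) →
      ∀ l ∈ ds.foldl (fun acc d =>
        if ¬(d.1 = 0 ∧ d.2 = 0) ∧ 0 ≤ loc.1 + d.1 ∧ loc.1 + d.1 ≤ (L : Int) - 1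
            ∧ 0 ≤ loc.2 + d.2 ∧ loc.2 + d.2 ≤ (L : Int) - 1 then
          acc ++ [(loc.1 + d.1, loc.2 + d.2)]
        else acc) acc, l ∈ pvGrid L by
    exact h pvDeltas [] (by simp)
  intro ds
  induction ds with
  | nil => intro acc hacc l hl; exact hacc l hl
  | cons d t ih =>
    intro acc hacc l hl
    simp only [List.foldl_cons] at hl
    apply ih _ ?_ l hl
    intro x hx
    by_cases hc : ¬(d.1 = 0 ∧ d.2 = 0) ∧ 0 ≤ loc.1 + d.1 ∧ loc.1 + d.1 ≤ (L : Int) - 1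
        ∧ 0 ≤ loc.2 + d.2 ∧ loc.2 + d.2 ≤ (L : Int) - 1
    · rw [if_pos hc] at hx
      rcases List.mem_append.mp hx with hx | hx
      · exact hacc x hx
      · rcases hc with ⟨-, h1, h2, h3, h4⟩
        simp at hx
        subst hx
        exact pvGrid_mem h1 (by omega) h3 (by omega)
    · rw [if_neg hc] at hx
      exact hacc x hx

-- the recursive helper itself (A), with the for-loop as the mutual function pvLoopA
mutual
def find_path_helper_py (start : Int × Int) (board : List (List String)) (n : Int) (curr_path : List (Int × Int)) (curr_word : String) (paths : List (List (Int × Int))) (words : List String) (find_by : String) : List (List (Int × Int)) :=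
  let key_len := pvKeyLen find_by curr_path curr_word
  if key_len = n then
    (if curr_word ∈ words then paths ++ [curr_path] else paths)
  else if key_len < n then
    pvLoopA board n words find_by curr_path curr_word paths
      (get_neighbors_py start (board.length : Int))
      (pvNeighbors_mem_grid start board.length)
  else paths
termination_by (pvMu board.length curr_path, 1, 0)

def pvLoopA (board : List (List String)) (n : Int) (words : List String) (find_by : String)
    (path : List (Int × Int)) (word : String) (paths : List (List (Int × Int)))
    (nbrs : List (Int × Int)) (h : ∀ l ∈ nbrs, l ∈ pvGrid board.length) : List (List (Int × Int)) :=
  match nbrs, h with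
  | [], _ => paths
  | loc :: rest, h =>
    if hmem : loc ∈ path then
      pvLoopA board n words find_by path word paths rest
        (fun l hl => h l (List.mem_cons_of_mem _ hl))
    else
      let cell := get_from_location_py board loc
      pvLoopA board n words find_by path (pvStrInit (word ++ cell))
        (find_path_helper_py loc board n (path ++ [loc]) (word ++ cell) paths words find_by)
        rest (fun l hl => h l (List.mem_cons_of_mem _ hl))
termination_by (pvMu board.length path, 0, nbrs.length)
decreasing_by
  · exact Prod.Lex.right _ (Prod.Lex.right _ (by simp))
  · exact Prod.Lex.left _ _ (pvMu_concat_lt (h loc List.mem_cons_self) hmem)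
  · exact Prod.Lex.right _ (Prod.Lex.right _ (by simp))
end

-- ===== PORT B =====
-- frame: (neighbor list, next index, word this frame resumes with, entered by a push)
-- state: (stack of frames — head is the top —, path, paths)

def pvOpenFrame (board : List (List String)) (n : Int) (find_by : String) (wset : PySem.Set String)
    (loc : Int × Int) (word : String) (pushed : Bool)
    (st : List ((List (Int × Int)) × Nat × String × Bool) × List (Int × Int) × List (List (Int × Int))) :
    List ((List (Int × Int)) × Nat × String × Bool) × List (Int × Int) × List (List (Int × Int)) :=
  match st with
  | (frames, path, paths) =>
    let k := pvKeyLen find_by path word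
    let paths := if k = n ∧ word ∈ wset then paths ++ [path] else paths
    (((if k < n then get_neighbors_py loc (board.length : Int) else []), 0, word, pushed) :: frames,
      path, paths)

def pvRunB (board : List (List String)) (n : Int) (find_by : String) (wset : PySem.Set String) :
    Nat → List ((List (Int × Int)) × Nat × String × Bool) × List (Int × Int) × List (List (Int × Int)) →
    List (List (Int × Int))
  | 0, (_, _, paths) => paths
  | _ + 1, ([], _, paths) => paths
  | f + 1, ((nbrs, i, w, pushed) :: K, path, paths) =>
    if hi : i < nbrs.length then
      let loc := nbrs[i]
      if loc ∈ path then
        pvRunB board n find_by wset f ((nbrs, i + 1, w, pushed) :: K, path, paths)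
      else
        let w' := w ++ get_from_location_py board loc
        pvRunB board n find_by wset f
          (pvOpenFrame board n find_by wset loc w' true
            ((nbrs, i + 1, pvStrInit w', pushed) :: K, path ++ [loc], paths))
    else
      if pushed then pvRunB board n find_by wset f (K, path.dropLast, paths)
      else pvRunB board n find_by wset f (K, path, paths)

-- fuel: an upper bound on the number of loop iterations; the stack is always emptied before it runs out
def pvFuel (L : Nat) : Nat := 10 * 11 ^ (L * L)

def find_path_helper_py_alt (start : Int × Int) (board : List (List String)) (n : Int) (curr_path : List (Int × Int)) (curr_word : String) (paths : List (List (Int × Int))) (words : List String) (find_by : String) : List (List (Int × Int)) :=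
  let wset := PySem.Set.ofList words
  pvRunB board n find_by wset (pvFuel board.length)
    (pvOpenFrame board n find_by wset start curr_word false ([], curr_path, paths))

-- ===== PRECONDITION & SPEC =====
-- Pre_ excludes inputs on which Python's board[x][y] can raise IndexError: it admits every input
-- whose board rows are at least board-length long (then every visited cell exists), and also every
-- input on which the DFS never reads the board at all (key already of length ≥ n, or a start so
-- far outside the board that it has no neighbors). This is conservative: A also returns on some
-- ragged boards whose short rows the DFS never happens to reach.
def Pre_find_path_helper_py (start : Int × Int) (board : List (List String)) (n : Int) (curr_path : List (Int × Int)) (curr_word : String) (paths : List (List (Int × Int))) (words : List String) (find_by : String) : Prop :=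
  (n ≤ (if find_by = "path" then (curr_path.length : Int) else PySem.Str.len curr_word)) ∨
  (start.1 < -1 ∨ (board.length : Int) < start.1 ∨ start.2 < -1 ∨ (board.length : Int) < start.2) ∨
  (∀ row ∈ board, board.length ≤ row.length)
instance (start : Int × Int) (board : List (List String)) (n : Int) (curr_path : List (Int × Int)) (curr_word : String) (paths : List (List (Int × Int))) (words : List String) (find_by : String) : Decidable (Pre_find_path_helper_py start board n curr_path curr_word paths words find_by) := by unfold Pre_find_path_helper_py; infer_instance

def pvWitness_find_path_helper_py : (Int × Int) × List (List String) × Int × (List (Int × Int)) × String × (List (List (Int × Int))) × List String × String :=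
  ((0, 0), [["a"]], 1, [], "", [], ["a"], "path")

def Spec_find_path_helper_py (start : Int × Int) (board : List (List String)) (n : Int) (curr_path : List (Int × Int)) (curr_word : String) (paths : List (List (Int × Int))) (words : List String) (find_by : String) (out : List (List (Int × Int))) : Prop := out = find_path_helper_py_alt start board n curr_path curr_word paths words find_by
instance (start : Int × Int) (board : List (List String)) (n : Int) (curr_path : List (Int × Int)) (curr_word : String) (paths : List (List (Int × Int))) (words : List String) (find_by : String) (out : List (List (Int × Int))) : Decidable (Spec_find_path_helper_py start board n curr_path curr_word paths words find_by out) := by unfold Spec_find_path_helper_py; infer_instance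

-- ===== CLAIM (what is proved, stated in full; the proofs are below) =====
def Claim_equal_find_path_helper_py : Prop := ∀ (start : Int × Int) (board : List (List String)) (n : Int) (curr_path : List (Int × Int)) (curr_word : String) (paths : List (List (Int × Int))) (words : List String) (find_by : String), Dom_find_path_helper_py start board n curr_path curr_word paths words find_by → Pre_find_path_helper_py start board n curr_path curr_word paths words find_by → Spec_find_path_helper_py start board n curr_path curr_word paths words find_by (find_path_helper_py start board n curr_path curr_word paths words find_by)

-- ===== LEMMAS AND PROOFS =====

theorem pvNeighbors_len_le (loc : Int × Int) (L : Int) :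
    (get_neighbors_py loc L).length ≤ 9 := by
  unfold get_neighbors_py
  suffices h : ∀ (ds : List (Int × Int)) (acc : List (Int × Int)),
      (ds.foldl (fun acc d =>
        if ¬(d.1 = 0 ∧ d.2 = 0) ∧ 0 ≤ loc.1 + d.1 ∧ loc.1 + d.1 ≤ L - 1
            ∧ 0 ≤ loc.2 + d.2 ∧ loc.2 + d.2 ≤ L - 1 then
          acc ++ [(loc.1 + d.1, loc.2 + d.2)]
        else acc) acc).length ≤ acc.length + ds.length by
    simpa using h pvDeltas []
  intro ds
  induction ds with
  | nil => intro acc; simp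
  | cons d t ih =>
    intro acc
    simp only [List.foldl_cons, List.length_cons]
    split
    · have h2 := ih (acc ++ [(loc.1 + d.1, loc.2 + d.2)])
      simp only [List.length_append, List.length_cons, List.length_nil] at h2
      omega
    · have h2 := ih acc; omega


-- per-iteration fuel bound of the stack machine at Mu-measure m
def pvIB : Nat → Nat
  | 0 => 1
  | m + 1 => 1 + 10 * 11 ^ m

-- "processing one opened frame costs at most 10·11^m machine steps and has exactly A's effect"
def pvNodeStmt (board : List (List String)) (n : Int) (words : List String) (find_by : String) (m : Nat) : Prop :=
  ∀ (loc : Int × Int) (word : String) (pushed : Bool) (path : List (Int × Int))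
    (paths : List (List (Int × Int))) (K : List ((List (Int × Int)) × Nat × String × Bool)),
    pvMu board.length path ≤ m →
    ∃ c ≤ 10 * 11 ^ m, ∀ f : Nat,
      pvRunB board n find_by (PySem.Set.ofList words) (c + f)
        (pvOpenFrame board n find_by (PySem.Set.ofList words) loc word pushed (K, path, paths))
      = pvRunB board n find_by (PySem.Set.ofList words) f
          (K, (if pushed then path.dropLast else path),
            find_path_helper_py loc board n path word paths words find_by)

theorem pvRunB_nil (board : List (List String)) (n : Int) (find_by : String) (wset : PySem.Set String)
    (f : Nat) (path : List (Int × Int)) (paths : List (List (Int × Int))) :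
    pvRunB board n find_by wset f ([], path, paths) = paths := by
  cases f <;> rfl

-- one machine step, in each of the three shapes the loop body can take
theorem pvRunB_step_skip (board : List (List String)) (n : Int) (find_by : String)
    (wset : PySem.Set String) (f : Nat) (nbrs : List (Int × Int)) (i : Nat) (w : String)
    (pushed : Bool) (K : List ((List (Int × Int)) × Nat × String × Bool))
    (path : List (Int × Int)) (paths : List (List (Int × Int)))
    (hi : i < nbrs.length) (hmem : nbrs[i] ∈ path) :
    pvRunB board n find_by wset (f + 1) ((nbrs, i, w, pushed) :: K, path, paths)
      = pvRunB board n find_by wset f ((nbrs, i + 1, w, pushed) :: K, path, paths) := by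
  simp [pvRunB, hi, hmem]

theorem pvRunB_step_push (board : List (List String)) (n : Int) (find_by : String)
    (wset : PySem.Set String) (f : Nat) (nbrs : List (Int × Int)) (i : Nat) (w : String)
    (pushed : Bool) (K : List ((List (Int × Int)) × Nat × String × Bool))
    (path : List (Int × Int)) (paths : List (List (Int × Int)))
    (hi : i < nbrs.length) (hmem : nbrs[i] ∉ path) :
    pvRunB board n find_by wset (f + 1) ((nbrs, i, w, pushed) :: K, path, paths)
      = pvRunB board n find_by wset f
          (pvOpenFrame board n find_by wset nbrs[i]
            (w ++ get_from_location_py board nbrs[i]) true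
            ((nbrs, i + 1, pvStrInit (w ++ get_from_location_py board nbrs[i]), pushed) :: K,
              path ++ [nbrs[i]], paths)) := by
  simp [pvRunB, hi, hmem]

theorem pvRunB_step_pop (board : List (List String)) (n : Int) (find_by : String)
    (wset : PySem.Set String) (f : Nat) (nbrs : List (Int × Int)) (i : Nat) (w : String)
    (pushed : Bool) (K : List ((List (Int × Int)) × Nat × String × Bool))
    (path : List (Int × Int)) (paths : List (List (Int × Int)))
    (hi : ¬ i < nbrs.length) :
    pvRunB board n find_by wset (f + 1) ((nbrs, i, w, pushed) :: K, path, paths)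
      = pvRunB board n find_by wset f (K, (if pushed then path.dropLast else path), paths) := by
  cases pushed <;> simp [pvRunB, hi]

-- unfolding equations of A's loop
theorem pvLoopA_nil (board : List (List String)) (n : Int) (words : List String) (find_by : String)
    (path : List (Int × Int)) (word : String) (paths : List (List (Int × Int)))
    (h : ∀ l ∈ ([] : List (Int × Int)), l ∈ pvGrid board.length) :
    pvLoopA board n words find_by path word paths [] h = paths := by
  rw [pvLoopA]

theorem pvLoopA_cons_mem (board : List (List String)) (n : Int) (words : List String)
    (find_by : String) (path : List (Int × Int)) (word : String)
    (paths : List (List (Int × Int))) (loc : Int × Int) (rest : List (Int × Int))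
    (h : ∀ l ∈ loc :: rest, l ∈ pvGrid board.length) (hmem : loc ∈ path) :
    pvLoopA board n words find_by path word paths (loc :: rest) h
      = pvLoopA board n words find_by path word paths rest
          (fun l hl => h l (List.mem_cons_of_mem _ hl)) := by
  rw [pvLoopA]; simp [hmem]

theorem pvLoopA_cons_not_mem (board : List (List String)) (n : Int) (words : List String)
    (find_by : String) (path : List (Int × Int)) (word : String)
    (paths : List (List (Int × Int))) (loc : Int × Int) (rest : List (Int × Int))
    (h : ∀ l ∈ loc :: rest, l ∈ pvGrid board.length) (hmem : loc ∉ path) :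
    pvLoopA board n words find_by path word paths (loc :: rest) h
      = pvLoopA board n words find_by path
          (pvStrInit (word ++ get_from_location_py board loc))
          (find_path_helper_py loc board n (path ++ [loc])
            (word ++ get_from_location_py board loc) paths words find_by)
          rest (fun l hl => h l (List.mem_cons_of_mem _ hl)) := by
  rw [pvLoopA]; simp [hmem]

theorem pvLoopA_congr (board : List (List String)) (n : Int) (words : List String)
    (find_by : String) (path : List (Int × Int)) (word : String)
    (paths : List (List (Int × Int))) {nbrs nbrs' : List (Int × Int)} (e : nbrs = nbrs')
    (h1 : ∀ l ∈ nbrs, l ∈ pvGrid board.length) (h2 : ∀ l ∈ nbrs', l ∈ pvGrid board.length) :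
    pvLoopA board n words find_by path word paths nbrs h1
      = pvLoopA board n words find_by path word paths nbrs' h2 := by
  subst e; rfl

theorem pvIB_pos (m : Nat) : 1 ≤ pvIB m := by
  cases m <;> simp [pvIB]

theorem pvLoop_sim (board : List (List String)) (n : Int) (words : List String) (find_by : String)
    (m : Nat) (Hnode : ∀ m' < m, pvNodeStmt board n words find_by m') :
    ∀ (d : Nat) (nbrs : List (Int × Int)) (h : ∀ l ∈ nbrs, l ∈ pvGrid board.length) (i : Nat),
      nbrs.length ≤ i + d →
      ∀ (word : String) (pushed : Bool) (path : List (Int × Int))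
        (paths : List (List (Int × Int))) (K : List ((List (Int × Int)) × Nat × String × Bool)),
        pvMu board.length path ≤ m →
        ∃ c ≤ 1 + (nbrs.length - i) * pvIB m, ∀ f : Nat,
          pvRunB board n find_by (PySem.Set.ofList words) (c + f)
            ((nbrs, i, word, pushed) :: K, path, paths)
          = pvRunB board n find_by (PySem.Set.ofList words) f
              (K, (if pushed then path.dropLast else path),
                pvLoopA board n words find_by path word paths (nbrs.drop i)
                  (fun l hl => h l (List.mem_of_mem_drop hl))) := by
  intro d
  induction d with
  | zero =>
    intro nbrs h i hlen word pushed path paths K hμ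
    have hge : ¬ i < nbrs.length := by omega
    have hdrop : nbrs.drop i = [] := List.drop_eq_nil_iff.mpr (by omega)
    refine ⟨1, by omega, ?_⟩
    intro f
    rw [Nat.add_comm 1 f, pvRunB_step_pop _ _ _ _ _ _ _ _ _ _ _ _ hge]
    have hLA : pvLoopA board n words find_by path word paths (nbrs.drop i)
        (fun l hl => h l (List.mem_of_mem_drop hl)) = paths :=
      (pvLoopA_congr board n words find_by path word paths hdrop _
        (by simp)).trans (pvLoopA_nil _ _ _ _ _ _ _ _)
    rw [hLA]
  | succ d ihd =>
    intro nbrs h i hlen word pushed path paths K hμ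
    by_cases hi : i < nbrs.length
    · have hdrop := List.drop_eq_getElem_cons hi
      by_cases hmem : nbrs[i] ∈ path
      · -- skip this neighbor
        obtain ⟨c', hc', hrun'⟩ := ihd nbrs h (i + 1) (by omega) word pushed path paths K hμ
        refine ⟨1 + c', ?_, ?_⟩
        · have h1 := pvIB_pos m
          have : nbrs.length - i = (nbrs.length - (i + 1)) + 1 := by omega
          rw [this, Nat.succ_mul]
          omega
        · intro f
          rw [show 1 + c' + f = (c' + f) + 1 by omega,
            pvRunB_step_skip _ _ _ _ _ _ _ _ _ _ _ _ hi hmem, hrun' f]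
          have hLA : pvLoopA board n words find_by path word paths (nbrs.drop i)
              (fun l hl => h l (List.mem_of_mem_drop hl))
              = pvLoopA board n words find_by path word paths (nbrs.drop (i + 1))
                  (fun l hl => h l (List.mem_of_mem_drop hl)) :=
            (pvLoopA_congr board n words find_by path word paths hdrop _
              (fun l hl => h l (by rw [← hdrop] at hl; exact List.mem_of_mem_drop hl))).trans
              (pvLoopA_cons_mem _ _ _ _ _ _ _ _ _ _ hmem)
          rw [hLA]
      · -- visit the subtree rooted at this neighbor
        have hgrid : nbrs[i] ∈ pvGrid board.length := h _ (List.getElem_mem hi)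
        have hμlt : pvMu board.length (path ++ [nbrs[i]]) < pvMu board.length path :=
          pvMu_concat_lt hgrid hmem
        obtain ⟨m', rfl⟩ : ∃ m', m = m' + 1 := ⟨m - 1, by omega⟩
        obtain ⟨c₁, hc₁, hrun₁⟩ :=
          Hnode m' (by omega) nbrs[i] (word ++ get_from_location_py board nbrs[i]) true
            (path ++ [nbrs[i]]) paths
            ((nbrs, i + 1, pvStrInit (word ++ get_from_location_py board nbrs[i]), pushed) :: K)
            (by omega)
        obtain ⟨c₂, hc₂, hrun₂⟩ := ihd nbrs h (i + 1) (by omega)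
          (pvStrInit (word ++ get_from_location_py board nbrs[i])) pushed path
          (find_path_helper_py nbrs[i] board n (path ++ [nbrs[i]])
            (word ++ get_from_location_py board nbrs[i]) paths words find_by) K hμ
        refine ⟨1 + c₁ + c₂, ?_, ?_⟩
        · have : nbrs.length - i = (nbrs.length - (i + 1)) + 1 := by omega
          rw [this, Nat.succ_mul]
          simp only [pvIB] at hc₂ ⊢
          omega
        · intro f
          rw [show 1 + c₁ + c₂ + f = (c₁ + (c₂ + f)) + 1 by omega,
            pvRunB_step_push _ _ _ _ _ _ _ _ _ _ _ _ hi hmem, hrun₁ (c₂ + f)]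
          rw [List.dropLast_concat] at hrun₁ ⊢
          rw [show (if true = true then path else path ++ [nbrs[i]]) = path by simp]
          rw [hrun₂ f]
          have hLA : pvLoopA board n words find_by path word paths (nbrs.drop i)
              (fun l hl => h l (List.mem_of_mem_drop hl))
              = pvLoopA board n words find_by path
                  (pvStrInit (word ++ get_from_location_py board nbrs[i]))
                  (find_path_helper_py nbrs[i] board n (path ++ [nbrs[i]])
                    (word ++ get_from_location_py board nbrs[i]) paths words find_by)
                  (nbrs.drop (i + 1)) (fun l hl => h l (List.mem_of_mem_drop hl)) :=
            (pvLoopA_congr board n words find_by path word paths hdrop _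
              (fun l hl => h l (by rw [← hdrop] at hl; exact List.mem_of_mem_drop hl))).trans
              (pvLoopA_cons_not_mem _ _ _ _ _ _ _ _ _ _ hmem)
          rw [hLA]
    · have hdrop : nbrs.drop i = [] := List.drop_eq_nil_iff.mpr (by omega)
      refine ⟨1, by omega, ?_⟩
      intro f
      rw [Nat.add_comm 1 f, pvRunB_step_pop _ _ _ _ _ _ _ _ _ _ _ _ hi]
      have hLA : pvLoopA board n words find_by path word paths (nbrs.drop i)
          (fun l hl => h l (List.mem_of_mem_drop hl)) = paths :=
        (pvLoopA_congr board n words find_by path word paths hdrop _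
          (by simp)).trans (pvLoopA_nil _ _ _ _ _ _ _ _)
      rw [hLA]

theorem pvNode_sim (board : List (List String)) (n : Int) (words : List String) (find_by : String) :
    ∀ m : Nat, pvNodeStmt board n words find_by m := by
  intro m
  induction m using Nat.strong_induction_on with
  | _ m IH =>
    intro loc word pushed path paths K hμ
    simp only [pvOpenFrame]
    by_cases hk : pvKeyLen find_by path word = n
    · have hnlt : ¬ pvKeyLen find_by path word < n := by omega
      refine ⟨1, Nat.one_le_iff_ne_zero.mpr (by positivity), ?_⟩
      intro f
      simp only [hnlt, if_false]
      rw [Nat.add_comm 1 f, pvRunB_step_pop _ _ _ _ _ _ _ _ _ _ _ _ (by simp)]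
      congr 1
      rw [find_path_helper_py]
      simp only [hk, PySem.Set.mem_ofList, if_true, true_and]
    · by_cases hlt : pvKeyLen find_by path word < n
      · obtain ⟨c, hc, hrun⟩ := pvLoop_sim board n words find_by m IH
          (get_neighbors_py loc (board.length : Int)).length
          (get_neighbors_py loc (board.length : Int))
          (pvNeighbors_mem_grid loc board.length) 0 (by omega) word pushed path paths K hμ
        have hlen9 := pvNeighbors_len_le loc (board.length : Int)
        refine ⟨c, ?_, ?_⟩
        · cases m with
          | zero =>
            simp only [pvIB] at hc
            simp only [pow_zero]
            omega
          | succ m' =>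
            simp only [pvIB] at hc
            have h11 : 1 ≤ 11 ^ m' := Nat.one_le_pow _ _ (by norm_num)
            have h2 : ((get_neighbors_py loc (board.length : Int)).length - 0) * (1 + 10 * 11 ^ m')
                ≤ 9 * (1 + 10 * 11 ^ m') := Nat.mul_le_mul_right _ (by omega)
            have h3 : 11 ^ (m' + 1) = 11 * 11 ^ m' := by ring
            rw [h3]
            omega
        · intro f
          simp only [hk, hlt, false_and, if_false, if_true]
          rw [hrun f]
          have hLA : pvLoopA board n words find_by path word paths
              (List.drop 0 (get_neighbors_py loc (board.length : Int)))
              (fun l hl => (pvNeighbors_mem_grid loc board.length) l (List.mem_of_mem_drop hl))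
              = pvLoopA board n words find_by path word paths
                  (get_neighbors_py loc (board.length : Int))
                  (pvNeighbors_mem_grid loc board.length) :=
            pvLoopA_congr _ _ _ _ _ _ _ List.drop_zero _ _
          rw [hLA, find_path_helper_py]
          simp only [hk, hlt, if_false, if_true]
      · -- key longer than n: nothing happens
        refine ⟨1, Nat.one_le_iff_ne_zero.mpr (by positivity), ?_⟩
        intro f
        have hpaths : (if pvKeyLen find_by path word = n ∧ word ∈ PySem.Set.ofList words
            then paths ++ [path] else paths) = paths := by simp [hk]
        have hfind : find_path_helper_py loc board n path word paths words find_by = paths := by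
          rw [find_path_helper_py]; simp [hk, hlt]
        simp only [hlt, if_false, hpaths, hfind]
        rw [Nat.add_comm 1 f, pvRunB_step_pop _ _ _ _ _ _ _ _ _ _ _ _ (by simp)]

theorem pvMu_le_sq (L : Nat) (path : List (Int × Int)) : pvMu L path ≤ L * L := by
  unfold pvMu
  calc ((pvGrid L).filter _).length ≤ (pvGrid L).length := List.length_filter_le _ _
    _ = L * L := by simp [pvGrid, List.length_product]

-- ===== VERDICT (by name: the statement is the Claim_ definition above) =====
theorem find_path_helper_py_spec : Claim_equal_find_path_helper_py := by
  intro start board n curr_path curr_word paths words find_by _ _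
  unfold Spec_find_path_helper_py find_path_helper_py_alt
  obtain ⟨c, hc, hrun⟩ := pvNode_sim board n words find_by
    (pvMu board.length curr_path) start curr_word false curr_path paths [] le_rfl
  have hcle : c ≤ pvFuel board.length := by
    have h1 : pvMu board.length curr_path ≤ board.length * board.length :=
      pvMu_le_sq board.length curr_path
    have h2 : (11 : Nat) ^ pvMu board.length curr_path ≤ 11 ^ (board.length * board.length) :=
      Nat.pow_le_pow_right (by norm_num) h1
    unfold pvFuel
    omega
  have hfuel : pvFuel board.length = c + (pvFuel board.length - c) := by omega
  rw [hfuel, hrun (pvFuel board.length - c), pvRunB_nil]
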